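-- pv_equiv track=rewrite | github.com/EnzoGitMoreau/dgfip2 | running_python2.py | series_temporelles
-- ===== SOURCE A (Python) =====
-- def series_temporelles(tableau, nombre_series,rem_f = True):#Coupe les données en 3 séries temporelles (CAF,CIP,CPP)
--     tableau.pop(0)
--     n = len(tableau)
--     nombre_iter= int(n/nombre_series)
--     listes = [[] for i in range(nombre_series)]
--     for i in range(nombre_iter):
--         for j in range(nombre_series):
--             listes[j].append(tableau[i*nombre_series+j])
--
--     return listes
-- ===== SOURCE B (Python) =====
-- def series_temporelles(tableau, nombre_series, rem_f=True):
--     # Note: like the original, this mutates `tableau` (drops its first element).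
--     tableau.pop(0)
--     nombre_iter = int(len(tableau) / nombre_series)
--     stop = nombre_iter * nombre_series
--     return [tableau[j:stop:nombre_series] for j in range(nombre_series)]
-- ===== Notes on version B (the rewrite author's own statement) =====
-- stated objective: alternative
-- what changed: Extracts each series directly as one strided slice tableau[j:stop:nombre_series] (column extraction, no element loop, no buckets, no transpose) instead of A's interleaved double loop appending element by element to per-series lists.
import Mathlib
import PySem

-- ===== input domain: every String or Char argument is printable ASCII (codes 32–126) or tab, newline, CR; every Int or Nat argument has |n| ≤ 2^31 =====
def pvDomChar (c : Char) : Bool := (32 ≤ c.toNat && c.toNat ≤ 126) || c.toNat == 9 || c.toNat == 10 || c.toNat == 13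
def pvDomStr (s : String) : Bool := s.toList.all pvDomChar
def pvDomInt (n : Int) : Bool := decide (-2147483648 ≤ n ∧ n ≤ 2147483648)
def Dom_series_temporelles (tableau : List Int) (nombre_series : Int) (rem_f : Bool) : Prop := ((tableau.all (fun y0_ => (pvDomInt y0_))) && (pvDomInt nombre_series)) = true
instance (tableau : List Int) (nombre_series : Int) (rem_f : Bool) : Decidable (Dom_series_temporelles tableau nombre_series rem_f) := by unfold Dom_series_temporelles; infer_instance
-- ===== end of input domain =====

-- B extracts each series directly as one strided slice tableau[j:stop:nombre_series] instead of
-- A's interleaved double loop appending element by element; same O(n) cost.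
-- Both Pythons mutate `tableau` in place (pop(0)); the equivalence proved is about the return
-- value (both ports read `tableau.tail`).

-- ===== PORT A =====
-- `tableau.pop(0)` raises IndexError on [] and `int(n/nombre_series)` raises ZeroDivisionError
-- for nombre_series = 0: both excluded by Pre_ below.  `int(n/nombre_series)` truncates toward
-- zero: Int.tdiv (exact for the list lengths at hand).  Inside the loops 0 ≤ j (so j.toNat is
-- exact) and the index i*nombre_series+j is always in range (i < nombre_iter, j < nombre_series),
-- so pyGetD's default is never taken.
def series_temporelles (tableau : List Int) (nombre_series : Int) (rem_f : Bool) : List (List Int) :=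
  let t := tableau.tail
  let n : Int := t.length
  let nombre_iter : Int := Int.tdiv n nombre_series
  let listes : List (List Int) := (PySem.List.pyRange 0 nombre_series 1).map (fun _ => [])
  (PySem.List.pyRange 0 nombre_iter 1).foldl (fun st i =>
    (PySem.List.pyRange 0 nombre_series 1).foldl (fun st j =>
      st.modify j.toNat (fun l => l ++ [PySem.List.pyGetD t (i * nombre_series + j) 0])) st) listes

-- ===== PORT B =====
-- tableau[j:stop:nombre_series] is PySem.List.slice?; it is none only for step 0, which the
-- comprehension never reaches (range(0) is empty then), so .getD [] is never taken on Pre_.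
def series_temporelles_alt (tableau : List Int) (nombre_series : Int) (rem_f : Bool) : List (List Int) :=
  let t := tableau.tail
  let nombre_iter : Int := Int.tdiv (t.length : Int) nombre_series
  let stop : Int := nombre_iter * nombre_series
  (PySem.List.pyRange 0 nombre_series 1).map
    (fun j => (PySem.List.slice? t (some j) (some stop) nombre_series).getD [])

-- ===== PRECONDITION & SPEC =====
-- Pre_ excludes exactly the inputs where A raises: an empty tableau (IndexError from pop(0))
-- and nombre_series = 0 (ZeroDivisionError).
def Pre_series_temporelles (tableau : List Int) (nombre_series : Int) (rem_f : Bool) : Prop :=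
  tableau ≠ [] ∧ nombre_series ≠ 0
instance (tableau : List Int) (nombre_series : Int) (rem_f : Bool) : Decidable (Pre_series_temporelles tableau nombre_series rem_f) := by unfold Pre_series_temporelles; infer_instance
def pvWitness_series_temporelles : List Int × Int × Bool := ([9, 1, 2, 3, 4, 5, 6], 3, true)

def Spec_series_temporelles (tableau : List Int) (nombre_series : Int) (rem_f : Bool) (out : List (List Int)) : Prop := out = series_temporelles_alt tableau nombre_series rem_f
instance (tableau : List Int) (nombre_series : Int) (rem_f : Bool) (out : List (List Int)) : Decidable (Spec_series_temporelles tableau nombre_series rem_f out) := by unfold Spec_series_temporelles; infer_instance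

-- ===== CLAIM (what is proved, stated in full; the proofs are below) =====
def Claim_equal_series_temporelles : Prop := ∀ (tableau : List Int) (nombre_series : Int) (rem_f : Bool), Dom_series_temporelles tableau nombre_series rem_f → Pre_series_temporelles tableau nombre_series rem_f → Spec_series_temporelles tableau nombre_series rem_f (series_temporelles tableau nombre_series rem_f)

-- ===== LEMMAS AND PROOFS =====

-- modify at j < N of a range-map rewrites just entry j
theorem pv_modify_map_range {N j : Nat} (g : Nat → List Int) (f : List Int → List Int)
    (hj : j < N) :
    ((List.range N).map g).modify j f
      = (List.range N).map (fun j' => if j' = j then f (g j') else g j') := by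
  apply List.ext_getElem
  · simp
  · intro k h1 h2
    simp only [List.getElem_modify, List.getElem_map, List.getElem_range] at *
    by_cases hk : j = k
    · simp [hk]
    · simp [hk]
      intro h; exact absurd h.symm hk

theorem pv_fold_modify (N : Nat) (w : Nat → Int) (g : Nat → List Int) (m : Nat) (hm : m ≤ N) :
    (List.range m).foldl (fun st j => st.modify j (fun l => l ++ [w j])) ((List.range N).map g)
      = (List.range N).map (fun j => if j < m then g j ++ [w j] else g j) := by
  induction m with
  | zero => simp
  | succ k ih =>
    rw [List.range_succ, List.foldl_append, ih (by omega)]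
    simp only [List.foldl_cons, List.foldl_nil]
    rw [pv_modify_map_range _ _ (by omega)]
    apply List.map_congr_left
    intro x _
    by_cases hx : x = k
    · subst hx; simp
    · by_cases hlt : x < k <;> simp [hx, hlt] <;> omega

-- the inner j-loop: one pass of appends over all j
theorem pv_inner (v : Int → Int) (N : Nat) (g : Nat → List Int) :
    ((PySem.List.pyRange 0 (N : Int) 1).foldl (fun st j =>
        st.modify j.toNat (fun l => l ++ [v j])) ((List.range N).map g))
      = (List.range N).map (fun j => g j ++ [v (j : Int)]) := by
  rw [PySem.List.pyRange_zero_natCast, List.foldl_map]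
  have := pv_fold_modify N (fun j => v (j : Int)) g N le_rfl
  simp only [Int.toNat_natCast] at *
  rw [this]
  simp

-- the outer i-loop invariant: after K iterations column j holds [t[i*N+j] for i in range K]
theorem pv_outer (t : List Int) (N K : Nat) :
    ((PySem.List.pyRange 0 (K : Int) 1).foldl (fun st i =>
        (PySem.List.pyRange 0 (N : Int) 1).foldl (fun st j =>
          st.modify j.toNat (fun l => l ++ [PySem.List.pyGetD t (i * (N : Int) + j) 0])) st)
      ((PySem.List.pyRange 0 (N : Int) 1).map (fun _ => [])))
      = (List.range N).map (fun j : Nat => (List.range K).map (fun i : Nat => PySem.List.pyGetD t ((i : Int) * (N : Int) + (j : Int)) 0)) := by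
  induction K with
  | zero =>
    rw [PySem.List.pyRange_zero_natCast, List.map_map]
    simp only [List.range_zero, List.map_nil]
    rfl
  | succ k ih =>
    have hcast : ((k + 1 : Nat) : Int) = (k : Int) + 1 := by push_cast; ring
    rw [hcast, PySem.List.pyRange_one_succ_right (by positivity), List.foldl_append, ih]
    simp only [List.foldl_cons, List.foldl_nil]
    rw [pv_inner (fun j => PySem.List.pyGetD t ((k : Int) * N + j) 0) N _]
    apply List.map_congr_left
    intro j _
    rw [List.range_succ, List.map_append]
    simp

-- the strided slice t[j : K*N : N] is exactly column j of the K full chunks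
theorem pv_strided (t : List Int) (N K jn : Nat) (hN : 0 < N) (hj : jn < N)
    (hKN : K * N ≤ t.length) :
    PySem.List.slice? t (some (jn : Int)) (some ((K : Int) * (N : Int))) (N : Int)
      = some ((List.range K).map (fun i : Nat => PySem.List.pyGetD t ((i : Int) * (N : Int) + (jn : Int)) 0)) := by
  have hNne : (N : Int) ≠ 0 := by exact_mod_cast hN.ne'
  have hNnlt : ¬ ((N : Int) < 0) := by omega
  have hjn0 : ¬ ((jn : Int) < 0) := by omega
  have hKN0 : ¬ ((K : Int) * (N : Int) < 0) := by simp only [not_lt]; positivity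
  have hstop : min ((K : Int) * (N : Int)) (t.length : Int) = (K : Int) * (N : Int) := by
    rw [min_eq_left]
    exact_mod_cast (by exact_mod_cast hKN : ((K * N : Nat) : Int) ≤ (t.length : Int))
  rw [PySem.List.slice?, PySem.List.sliceIndices]
  simp only [if_neg hNne, if_neg hNnlt, if_neg hjn0, if_neg hKN0, if_pos (show (0:Int) < N by omega)]
  rw [hstop]
  rcases Nat.eq_zero_or_pos K with hK0 | hKpos
  · subst hK0
    have hlt0 : ¬ (min (jn : Int) (t.length : Int) < (0 : Nat) * (N : Int)) := by
      simp only [Nat.cast_zero, zero_mul]; omega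
    simp only [Nat.cast_zero, zero_mul] at hlt0 ⊢
    rw [if_neg hlt0]
    simp
  · have hNle : N ≤ t.length := le_trans (by nlinarith) hKN
    have hsmin : min (jn : Int) (t.length : Int) = (jn : Int) := by
      rw [min_eq_left]; exact_mod_cast le_of_lt (lt_of_lt_of_le hj hNle)
    rw [hsmin]
    have hlt : (jn : Int) < (K : Int) * (N : Int) := by
      have : (1 : Int) * (N : Int) ≤ (K : Int) * (N : Int) := by
        apply mul_le_mul_of_nonneg_right <;> omega
      omega
    rw [if_pos hlt]
    have hcount : (((K : Int) * N - jn + N - 1) / N).toNat = K := by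
      have hr : ((K : Int) * N - jn + N - 1) = ((N : Int) - 1 - jn) + (K : Int) * N := by ring
      rw [hr, Int.add_mul_ediv_right _ _ hNne, Int.ediv_eq_zero_of_lt (by omega) (by omega)]
      simp
    rw [hcount]
    congr 1
    have hmem : ∀ k ∈ List.range K,
        (fun k : Nat => t[((jn : Int) + (N : Int) * k).toNat]?) k
          = (fun k : Nat => some (PySem.List.pyGetD t ((k : Int) * (N : Int) + (jn : Int)) 0)) k := by
      intro k hk
      simp only [List.mem_range] at hk
      have hidx : ((jn : Int) + (N : Int) * k).toNat = jn + N * k := by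
        omega
      have hrange : jn + N * k < t.length := by
        have : jn + N * k + 1 ≤ K * N := by nlinarith
        omega
      have hcastidx : (k : Int) * (N : Int) + (jn : Int) = ((jn + N * k : Nat) : Int) := by
        push_cast; ring
      dsimp only
      rw [hidx, hcastidx, PySem.List.pyGetD_natCast]
      rw [List.getElem?_eq_getElem hrange]
      simp [List.getD_eq_getElem?_getD, List.getElem?_eq_getElem hrange]
    rw [List.filterMap_congr hmem]
    rw [List.filterMap_eq_map']

theorem pv_main (tab : List Int) (ns : Int) (rf : Bool) (hne : tab ≠ []) (hns : ns ≠ 0) :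
    series_temporelles tab ns rf = series_temporelles_alt tab ns rf := by
  unfold series_temporelles series_temporelles_alt
  dsimp only
  set t := tab.tail with ht
  set n : Int := (t.length : Int) with hn
  have hn0 : 0 ≤ n := by positivity
  have htd : Int.tdiv n ns = n / ns := Int.tdiv_eq_ediv_of_nonneg hn0
  rcases lt_or_gt_of_ne hns with hneg | hpos
  · -- nombre_series < 0 : both sides are []
    have hiter : Int.tdiv n ns ≤ 0 := by
      rw [htd]
      have := Int.ediv_nonneg (a := n) (b := -ns) hn0 (by omega)
      rw [Int.ediv_neg] at this
      omega
    rw [PySem.List.pyRange_one_eq_nil hiter, PySem.List.pyRange_one_eq_nil (le_of_lt hneg)]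
    simp
  · -- nombre_series > 0
    obtain ⟨N, hN⟩ : ∃ N : Nat, ns = (N : Int) := ⟨ns.toNat, by omega⟩
    have hN0 : 0 < N := by omega
    have hiter0 : 0 ≤ Int.tdiv n ns := by rw [htd]; exact Int.ediv_nonneg hn0 (le_of_lt hpos)
    obtain ⟨K, hK⟩ : ∃ K : Nat, Int.tdiv n ns = (K : Int) := ⟨(Int.tdiv n ns).toNat, by omega⟩
    have hKN : K * N ≤ t.length := by
      have hmod : 0 ≤ n % ns := Int.emod_nonneg n hns
      have hdm : ns * (n / ns) + n % ns = n := Int.mul_ediv_add_emod n ns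
      have hle : ns * (K : Int) ≤ n := by rw [← hK, htd] at *; omega
      rw [hN] at hle
      have h2 : ((K * N : Nat) : Int) ≤ n := by push_cast; linarith [hle]
      rw [hn] at h2
      exact_mod_cast h2
    rw [hK, hN]
    rw [pv_outer t N K]
    rw [PySem.List.pyRange_zero_natCast, List.map_map]
    apply List.map_congr_left
    intro jn hjn
    simp only [List.mem_range] at hjn
    simp only [Function.comp]
    rw [pv_strided t N K jn hN0 hjn hKN]
    rfl

-- ===== VERDICT (by name: the statement is the Claim_ definition above) =====
theorem series_temporelles_spec : Claim_equal_series_temporelles := by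
  intro tableau ns rf _ hpre
  unfold Spec_series_temporelles
  exact pv_main tableau ns rf hpre.1 hpre.2
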